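-- pv_equiv track=rewrite | github.com/JunYaoChan/MnA-Tax-Intelligence-Platform | Backend/services/llm_synthesis_service.py | _group_documents_by_source
-- ===== SOURCE A (Python) =====
-- from typing import Dict, List, Any
--
-- def _group_documents_by_source(documents: List[Dict]) -> Dict[str, List[Dict]]:
--     """Group documents by their source type"""
--     grouped = {
--         'regulations': [],
--         'case_law': [],
--         'precedents': [],
--         'external_sources': [],
--         'expert_knowledge': [],
--         'other': []
--     }
--
--     for doc in documents:
--         source = doc.get('source', '').lower()
--
--         if 'regulation' in source:
--             grouped['regulations'].append(doc)
--         elif any(term in source for term in ['case', 'ruling', 'court']):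
--             grouped['case_law'].append(doc)
--         elif 'precedent' in source:
--             grouped['precedents'].append(doc)
--         elif any(term in source for term in ['web_search', 'irs_api', 'external']):
--             grouped['external_sources'].append(doc)
--         elif 'expert' in source or 'knowledge' in source:
--             grouped['expert_knowledge'].append(doc)
--         else:
--             grouped['other'].append(doc)
--
--     return grouped
-- ===== SOURCE B (Python) =====
-- from typing import Dict, List, Any
--
-- _RULES = [
--     ('regulations', ['regulation']),
--     ('case_law', ['case', 'ruling', 'court']),
--     ('precedents', ['precedent']),
--     ('external_sources', ['web_search', 'irs_api', 'external']),
--     ('expert_knowledge', ['expert', 'knowledge']),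
-- ]
--
-- def _classify(doc):
--     source = doc.get('source', '').lower()
--     for key, terms in _RULES:
--         if any(term in source for term in terms):
--             return key
--     return 'other'
--
-- def _group_documents_by_source(documents: List[Dict]) -> Dict[str, List[Dict]]:
--     keys = [key for key, _ in _RULES] + ['other']
--     return {key: [doc for doc in documents if _classify(doc) == key] for key in keys}
-- ===== Notes on version B (the rewrite author's own statement) =====
-- stated objective: simpler
-- what changed: Replaces the single pass that appends through a five-branch if-elif chain with a table of (category, terms) rules, a first-matching-rule classifier, and a dict comprehension that builds each bucket as a filter of the documents by classified category.
import Mathlib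
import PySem

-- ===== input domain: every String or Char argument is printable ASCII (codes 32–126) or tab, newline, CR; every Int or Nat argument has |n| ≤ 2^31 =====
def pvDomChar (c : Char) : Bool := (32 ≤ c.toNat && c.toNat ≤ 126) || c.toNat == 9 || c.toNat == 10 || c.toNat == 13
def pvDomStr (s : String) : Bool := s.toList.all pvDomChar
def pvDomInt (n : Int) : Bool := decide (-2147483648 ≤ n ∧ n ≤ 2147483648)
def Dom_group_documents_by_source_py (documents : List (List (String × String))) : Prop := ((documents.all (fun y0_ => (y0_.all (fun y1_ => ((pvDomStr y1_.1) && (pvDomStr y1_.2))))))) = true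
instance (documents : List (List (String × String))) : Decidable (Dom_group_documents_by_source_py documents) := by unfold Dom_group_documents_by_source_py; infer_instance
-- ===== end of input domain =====

-- B replaces A's five-branch if-elif append loop with a rule table, a first-matching-rule
-- classifier, and one filter of the documents per category (objective: simpler).

-- ===== PORT A =====
-- grouped[k].append(doc) on the association list: append to the first entry with key k
def pvAppendAt (g : List (String × List (List (String × String)))) (k : String)
    (d : List (String × String)) : List (String × List (List (String × String))) :=
  match g with
  | [] => []
  | (k', v) :: rest => if k' == k then (k', v ++ [d]) :: rest else (k', v) :: pvAppendAt rest k d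

-- the body of A's for-loop
def pvStepA (g : List (String × List (List (String × String)))) (doc : List (String × String)) :
    List (String × List (List (String × String))) :=
  let source := PySem.Str.lower ((PySem.Dict.mk doc).getD "source" "")
  if PySem.Str.isIn "regulation" source then pvAppendAt g "regulations" doc
  else if ["case", "ruling", "court"].any (fun t => PySem.Str.isIn t source) then pvAppendAt g "case_law" doc
  else if PySem.Str.isIn "precedent" source then pvAppendAt g "precedents" doc
  else if ["web_search", "irs_api", "external"].any (fun t => PySem.Str.isIn t source) then pvAppendAt g "external_sources" doc
  else if PySem.Str.isIn "expert" source || PySem.Str.isIn "knowledge" source then pvAppendAt g "expert_knowledge" doc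
  else pvAppendAt g "other" doc

def group_documents_by_source_py (documents : List (List (String × String))) :
    List (String × List (List (String × String))) :=
  let grouped : List (String × List (List (String × String))) :=
    [("regulations", []), ("case_law", []), ("precedents", []),
     ("external_sources", []), ("expert_knowledge", []), ("other", [])]
  documents.foldl pvStepA grouped

-- ===== PORT B =====
def pvRules : List (String × List String) :=
  [("regulations", ["regulation"]),
   ("case_law", ["case", "ruling", "court"]),
   ("precedents", ["precedent"]),
   ("external_sources", ["web_search", "irs_api", "external"]),
   ("expert_knowledge", ["expert", "knowledge"])]

def pvClassifyGo (rules : List (String × List String)) (source : String) : String :=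
  match rules with
  | [] => "other"
  | (key, terms) :: rest =>
      if terms.any (fun t => PySem.Str.isIn t source) then key else pvClassifyGo rest source

def pvClassify (doc : List (String × String)) : String :=
  pvClassifyGo pvRules (PySem.Str.lower ((PySem.Dict.mk doc).getD "source" ""))

def group_documents_by_source_py_alt (documents : List (List (String × String))) :
    List (String × List (List (String × String))) :=
  (pvRules.map Prod.fst ++ ["other"]).map
    (fun key => (key, documents.filter (fun doc => pvClassify doc == key)))

-- ===== PRECONDITION & SPEC =====
def Spec_group_documents_by_source_py (documents : List (List (String × String))) (out : List (String × List (List (String × String)))) : Prop := out = group_documents_by_source_py_alt documents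
instance (documents : List (List (String × String))) (out : List (String × List (List (String × String)))) : Decidable (Spec_group_documents_by_source_py documents out) := by unfold Spec_group_documents_by_source_py; infer_instance

-- ===== CLAIM (what is proved, stated in full; the proofs are below) =====
def Claim_equal_group_documents_by_source_py : Prop := ∀ (documents : List (List (String × String))), Dom_group_documents_by_source_py documents → Spec_group_documents_by_source_py documents (group_documents_by_source_py documents)

-- ===== LEMMAS AND PROOFS =====

-- pvAppendAt on the concrete six-bucket list, one lemma per bucket

theorem pvApp1 (l1 l2 l3 l4 l5 l6 : List (List (String × String))) (d : List (String × String)) :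
    pvAppendAt [("regulations", l1), ("case_law", l2), ("precedents", l3), ("external_sources", l4), ("expert_knowledge", l5), ("other", l6)] "regulations" d = [("regulations", l1 ++ [d]), ("case_law", l2), ("precedents", l3), ("external_sources", l4), ("expert_knowledge", l5), ("other", l6)] := rfl

theorem pvApp2 (l1 l2 l3 l4 l5 l6 : List (List (String × String))) (d : List (String × String)) :
    pvAppendAt [("regulations", l1), ("case_law", l2), ("precedents", l3), ("external_sources", l4), ("expert_knowledge", l5), ("other", l6)] "case_law" d = [("regulations", l1), ("case_law", l2 ++ [d]), ("precedents", l3), ("external_sources", l4), ("expert_knowledge", l5), ("other", l6)] := rfl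

theorem pvApp3 (l1 l2 l3 l4 l5 l6 : List (List (String × String))) (d : List (String × String)) :
    pvAppendAt [("regulations", l1), ("case_law", l2), ("precedents", l3), ("external_sources", l4), ("expert_knowledge", l5), ("other", l6)] "precedents" d = [("regulations", l1), ("case_law", l2), ("precedents", l3 ++ [d]), ("external_sources", l4), ("expert_knowledge", l5), ("other", l6)] := rfl

theorem pvApp4 (l1 l2 l3 l4 l5 l6 : List (List (String × String))) (d : List (String × String)) :
    pvAppendAt [("regulations", l1), ("case_law", l2), ("precedents", l3), ("external_sources", l4), ("expert_knowledge", l5), ("other", l6)] "external_sources" d = [("regulations", l1), ("case_law", l2), ("precedents", l3), ("external_sources", l4 ++ [d]), ("expert_knowledge", l5), ("other", l6)] := rfl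

theorem pvApp5 (l1 l2 l3 l4 l5 l6 : List (List (String × String))) (d : List (String × String)) :
    pvAppendAt [("regulations", l1), ("case_law", l2), ("precedents", l3), ("external_sources", l4), ("expert_knowledge", l5), ("other", l6)] "expert_knowledge" d = [("regulations", l1), ("case_law", l2), ("precedents", l3), ("external_sources", l4), ("expert_knowledge", l5 ++ [d]), ("other", l6)] := rfl

theorem pvApp6 (l1 l2 l3 l4 l5 l6 : List (List (String × String))) (d : List (String × String)) :
    pvAppendAt [("regulations", l1), ("case_law", l2), ("precedents", l3), ("external_sources", l4), ("expert_knowledge", l5), ("other", l6)] "other" d = [("regulations", l1), ("case_law", l2), ("precedents", l3), ("external_sources", l4), ("expert_knowledge", l5), ("other", l6 ++ [d])] := rfl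

-- the loop invariant: folding A's step over docs extends each bucket by the docs B classifies there
theorem pv_foldl_invariant (docs : List (List (String × String)))
    (l1 l2 l3 l4 l5 l6 : List (List (String × String))) :
    docs.foldl pvStepA
      [("regulations", l1), ("case_law", l2), ("precedents", l3),
       ("external_sources", l4), ("expert_knowledge", l5), ("other", l6)] =
      [("regulations", l1 ++ docs.filter (fun d => pvClassify d == "regulations")),
       ("case_law", l2 ++ docs.filter (fun d => pvClassify d == "case_law")),
       ("precedents", l3 ++ docs.filter (fun d => pvClassify d == "precedents")),
       ("external_sources", l4 ++ docs.filter (fun d => pvClassify d == "external_sources")),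
       ("expert_knowledge", l5 ++ docs.filter (fun d => pvClassify d == "expert_knowledge")),
       ("other", l6 ++ docs.filter (fun d => pvClassify d == "other"))] := by
  induction docs generalizing l1 l2 l3 l4 l5 l6 with
  | nil => simp
  | cons d ds ih =>
      rw [List.foldl_cons]
      simp only [pvStepA]
      split_ifs with h1 h2 h3 h4 h5
      · have hc : pvClassify d = "regulations" := by
          simp [pvClassify, pvClassifyGo, pvRules]
          simp_all
        rw [pvApp1, ih]; simp [hc]
      · have hc : pvClassify d = "case_law" := by
          simp [pvClassify, pvClassifyGo, pvRules]
          simp_all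
        rw [pvApp2, ih]; simp [hc]
      · have hc : pvClassify d = "precedents" := by
          simp [pvClassify, pvClassifyGo, pvRules]
          simp_all
        rw [pvApp3, ih]; simp [hc]
      · have hc : pvClassify d = "external_sources" := by
          simp [pvClassify, pvClassifyGo, pvRules]
          simp_all
        rw [pvApp4, ih]; simp [hc]
      · have hc : pvClassify d = "expert_knowledge" := by
          simp [pvClassify, pvClassifyGo, pvRules]
          simp_all
        rw [pvApp5, ih]; simp [hc]
      · have hc : pvClassify d = "other" := by
          simp [pvClassify, pvClassifyGo, pvRules]
          simp_all
        rw [pvApp6, ih]; simp [hc]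

-- ===== VERDICT (by name: the statement is the Claim_ definition above) =====
theorem group_documents_by_source_py_spec : Claim_equal_group_documents_by_source_py := by
  intro documents _
  unfold Spec_group_documents_by_source_py group_documents_by_source_py group_documents_by_source_py_alt
  rw [pv_foldl_invariant]
  simp [pvRules]
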